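-- pv_equiv track=rewrite | github.com/Pova/leetcode-practice | leetcode/solutions/p1695_maximum_erasure_value.py | maximumErasureValue
-- ===== SOURCE A (Python) =====
-- from typing import List
--
-- def maximumErasureValue(nums: List[int]) -> int:
--
--     """
--     Solution might work but be too inefficient.
--     """
--
--     # [v, -, -, v, -]
--     # [a, b, c, d, e]
--
--     array_len = len(nums)
--     left_idx = 0
--     best_so_far = nums[0]
--     int_set = set([nums[0]])
--     current_sum = nums[0]
--
--     # move the right idx
--
--     for right_idx in range(left_idx+1, array_len):
--
--         new_num = nums[right_idx]
--
--         # check if new number is a duplicate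
--
--         if new_num in int_set:
--             # encountered a duplicate
--             # need to move the left index to the right until we encounter the same number
--
--             # encountered a duplicate
--             # [v, -, -, -, -, v]
--             # [1, 2, 3, 4, 5, 3]
--             # left = 1
--             # int_set = {1, 2, 3, 4, 5}
--
--             # [-, v, -, -, -, v]
--             # [1, 2, 3, 4, 5, 3]
--             # left = 2
--             # int_set = {2, 3, 4, 5}
--
--             # [-, -, v, -, -, v]
--             # [1, 2, 3, 4, 5, 3]
--             # left = 3
--             # int_set = {3, 4, 5}
--
--             # [1, 2, 3, 4, 5]
--             while nums[left_idx] != new_num: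
--                 int_set.remove(nums[left_idx])
--                 current_sum -= nums[left_idx]
--                 left_idx += 1
--
--             # current sum stays the same
--             left_idx += 1
--
--         else:
--             # not a duplicate
--
--             # add to int set
--             # add to current sum
--
--             int_set.add(new_num)
--             current_sum += new_num
--
--             if current_sum > best_so_far:
--                 best_so_far = current_sum
--
--     return best_so_far
-- ===== SOURCE B (Python) =====
-- from typing import List
--
-- def maximumErasureValue(nums: List[int]) -> int:
--     # Prefix-sum table + last-occurrence index dict: the left edge jumps
--     # directly past the previous occurrence instead of removing elements
--     # one by one, and window sums come from the prefix table.
--     prefix = [0]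
--     for x in nums:
--         prefix.append(prefix[-1] + x)
--     best = nums[0]
--     last = {}
--     left = 0
--     for right, x in enumerate(nums):
--         j = last.get(x)
--         if j is not None and j >= left:
--             # duplicate inside the window: jump the left edge past it
--             left = j + 1
--         else:
--             cur = prefix[right + 1] - prefix[left]
--             if cur > best:
--                 best = cur
--         last[x] = right
--     return best
-- ===== Notes on version B (the rewrite author's own statement) =====
-- stated objective: alternative
-- what changed: Replaces A's set plus element-by-element window-shrinking while-loop and running sum with a prefix-sum table and a last-occurrence-index dict: the left edge jumps past the duplicate in one step and window sums come from the prefix table.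
import Mathlib
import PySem

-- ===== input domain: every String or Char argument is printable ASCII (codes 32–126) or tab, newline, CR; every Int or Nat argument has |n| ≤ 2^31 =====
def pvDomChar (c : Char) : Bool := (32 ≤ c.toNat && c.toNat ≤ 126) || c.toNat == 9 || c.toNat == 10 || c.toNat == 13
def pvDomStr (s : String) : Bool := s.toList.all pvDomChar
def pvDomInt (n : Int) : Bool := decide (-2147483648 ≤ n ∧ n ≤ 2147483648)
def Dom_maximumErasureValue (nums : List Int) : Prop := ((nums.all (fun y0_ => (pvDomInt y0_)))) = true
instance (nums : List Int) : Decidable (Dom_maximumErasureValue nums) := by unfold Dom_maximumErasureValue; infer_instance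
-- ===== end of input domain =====

-- B replaces A's set + element-by-element window shrinking with a prefix-sum table and a
-- last-occurrence-index dict whose left edge jumps in one step (objective: alternative).

-- ===== PORT A =====
-- the inner `while nums[left_idx] != new_num` loop of A; `fuel` only makes the recursion
-- structural (the `none` branches are where Python would raise IndexError / KeyError —
-- unreachable while the loop's invariant holds, which Pre_ guarantees).
def pvAShrink (nums : List Int) (newNum : Int) :
    Nat → Nat → PySem.Set Int → Int → Nat × PySem.Set Int × Int
  | 0, left, s, cur => (left, s, cur)
  | fuel + 1, left, s, cur =>
    match PySem.List.pyGet? nums (left : Int) with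
    | none => (left, s, cur)       -- Python: IndexError (unreachable)
    | some v =>
      if v ≠ newNum then
        match PySem.Set.remove? s v with
        | none => (left, s, cur)   -- Python: KeyError (unreachable: v is in the window set)
        | some s' => pvAShrink nums newNum fuel (left + 1) s' (cur - v)
      else (left, s, cur)

-- one iteration of A's `for right_idx in range(...)` loop; state = (left_idx, int_set, current_sum, best_so_far)
def pvStepA (nums : List Int) : Nat × PySem.Set Int × Int × Int → Int →
    Nat × PySem.Set Int × Int × Int
  | (left, s, cur, best), r =>
    match PySem.List.pyGet? nums r with
    | none => (left, s, cur, best)   -- Python: IndexError (unreachable: r < len(nums))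
    | some newNum =>
      if PySem.Set.contains s newNum then
        let (left', s', cur') := pvAShrink nums newNum nums.length left s cur
        (left' + 1, s', cur', best)
      else
        let cur' := cur + newNum
        (left, PySem.Set.add s newNum, cur', if cur' > best then cur' else best)

def maximumErasureValue (nums : List Int) : Int :=
  match PySem.List.pyGet? nums 0 with
  | none => 0                      -- Python: IndexError on the empty list; excluded by Pre_
  | some first =>
    ((PySem.List.pyRange (0 + 1) (nums.length : Int)).foldl (pvStepA nums)
      (0, PySem.Set.ofList [first], first, first)).2.2.2

-- ===== PORT B =====
-- the prefix-sum table: starts as a singleton zero and appends last-entry + x for each x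
-- (the last-entry read never raises in Python: the table is always nonempty)
def pvPrefix (nums : List Int) : List Int :=
  nums.foldl (fun p x => p ++ [(PySem.List.pyGet? p (-1)).getD 0 + x]) [0]

-- one iteration of B's `for right, x in enumerate(nums)` loop; state = (best, last, left).
-- the two prefix-table reads never raise in Python (indices stay in range): `.getD 0` is unreachable.
def pvStepB (pfx : List Int) : Int × PySem.Dict Int Int × Int → Int × Int →
    Int × PySem.Dict Int Int × Int
  | (best, last, left), (right, x) =>
    let noJump : Int × Int :=
      let cur := (PySem.List.pyGet? pfx (right + 1)).getD 0 - (PySem.List.pyGet? pfx left).getD 0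
      (if cur > best then cur else best, left)
    let (best', left') :=
      match last.get? x with
      | some j => if j ≥ left then (best, j + 1) else noJump   -- `j is not None and j >= left`
      | none => noJump
    (best', last.insert x right, left')

def maximumErasureValue_alt (nums : List Int) : Int :=
  let pfx := pvPrefix nums
  match PySem.List.pyGet? nums 0 with
  | none => 0                      -- Python: IndexError on the empty list; excluded by Pre_
  | some first =>
    ((PySem.List.enumerate nums).foldl (pvStepB pfx) (first, PySem.Dict.empty, 0)).1

-- ===== PRECONDITION & SPEC =====
-- Pre_ excludes only the empty list, on which A raises IndexError reading the first element.
def Pre_maximumErasureValue (nums : List Int) : Prop := nums ≠ []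
instance (nums : List Int) : Decidable (Pre_maximumErasureValue nums) := by
  unfold Pre_maximumErasureValue; infer_instance

def pvWitness_maximumErasureValue : List Int := [4, 2, 4, 5, 6]

def Spec_maximumErasureValue (nums : List Int) (out : Int) : Prop := out = maximumErasureValue_alt nums
instance (nums : List Int) (out : Int) : Decidable (Spec_maximumErasureValue nums out) := by
  unfold Spec_maximumErasureValue; infer_instance

-- ===== CLAIM (what is proved, stated in full; the proofs are below) =====
def Claim_equal_maximumErasureValue : Prop := ∀ (nums : List Int), Dom_maximumErasureValue nums → Pre_maximumErasureValue nums → Spec_maximumErasureValue nums (maximumErasureValue nums)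

-- ===== LEMMAS AND PROOFS =====

-- the window nums[L:m] (A's int_set holds exactly its elements)
def pvWin (nums : List Int) (L m : Nat) : List Int := (nums.take m).drop L

-- index of the last occurrence of x in nums[:m] (what B's dict `last` stores)
def pvLast (nums : List Int) : Nat → Int → Option Int
  | 0, _ => none
  | m + 1, x => if nums[m]? = some x then some (m : Int) else pvLast nums m x

lemma pvWin_mem {nums : List Int} {L m : Nat} (_hm : m ≤ nums.length) (y : Int) :
    y ∈ pvWin nums L m ↔ ∃ i : Nat, L ≤ i ∧ i < m ∧ nums[i]? = some y := by
  unfold pvWin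
  rw [List.mem_iff_getElem?]
  constructor
  · rintro ⟨d, hd⟩
    rw [List.getElem?_drop, List.getElem?_take] at hd
    split at hd
    · exact ⟨L + d, by omega, by assumption, hd⟩
    · exact absurd hd (by simp)
  · rintro ⟨i, h1, h2, h3⟩
    refine ⟨i - L, ?_⟩
    rw [List.getElem?_drop, List.getElem?_take, show L + (i - L) = i by omega, if_pos h2]
    exact h3

lemma pvWin_cons {nums : List Int} {L m : Nat} (hL : L < m) (hm : m ≤ nums.length)
    {v : Int} (hv : nums[L]? = some v) :
    pvWin nums L m = v :: pvWin nums (L + 1) m := by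
  unfold pvWin
  have hLlen : L < (nums.take m).length := by
    simp [List.length_take]; omega
  rw [List.drop_eq_getElem_cons hLlen]
  congr 1
  have h2 : (nums.take m)[L]? = some v := by
    rw [List.getElem?_take, if_pos hL]; exact hv
  rw [List.getElem?_eq_getElem hLlen] at h2
  exact Option.some_inj.mp h2

lemma pvWin_succ {nums : List Int} {L m : Nat} (hL : L ≤ m) (hm : m < nums.length)
    {x : Int} (hx : nums[m]? = some x) :
    pvWin nums L (m + 1) = pvWin nums L m ++ [x] := by
  unfold pvWin
  rw [List.take_succ, List.getElem?_eq_getElem hm] at *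
  have hx' : nums[m] = x := by simpa using hx
  rw [hx']
  exact List.drop_append_of_le_length (by simp [List.length_take]; omega)

lemma pvLast_spec {nums : List Int} {m : Nat} {x j : Int}
    (h : pvLast nums m x = some j) :
    ∃ jn : Nat, j = (jn : Int) ∧ jn < m ∧ nums[jn]? = some x ∧
      ∀ i : Nat, jn < i → i < m → nums[i]? ≠ some x := by
  induction m with
  | zero => simp [pvLast] at h
  | succ m ih =>
    unfold pvLast at h
    split at h
    · rename_i hocc
      refine ⟨m, by simpa using h.symm, by omega, hocc, ?_⟩
      intro i h1 h2 _; omega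
    · rename_i hocc
      obtain ⟨jn, h1, h2, h3, h4⟩ := ih h
      refine ⟨jn, h1, by omega, h3, ?_⟩
      intro i hi1 hi2
      rcases Nat.lt_succ_iff_lt_or_eq.mp hi2 with h | h
      · exact h4 i hi1 h
      · subst h; exact hocc

lemma pvLast_none {nums : List Int} {m : Nat} {x : Int}
    (h : pvLast nums m x = none) : ∀ i : Nat, i < m → nums[i]? ≠ some x := by
  induction m with
  | zero => intro i hi; omega
  | succ m ih =>
    unfold pvLast at h
    split at h
    · exact absurd h (by simp)
    · rename_i hocc
      intro i hi
      rcases Nat.lt_succ_iff_lt_or_eq.mp hi with h' | h'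
      · exact ih h i h'
      · subst h'; exact hocc

lemma pvLast_succ (nums : List Int) (m : Nat) (x y : Int) (hx : nums[m]? = some x) :
    pvLast nums (m + 1) y = if y = x then some (m : Int) else pvLast nums m y := by
  have h0 : pvLast nums (m + 1) y = if nums[m]? = some y then some (m : Int) else pvLast nums m y := by
    conv_lhs => rw [pvLast]
  rw [h0, hx]
  by_cases h : y = x
  · subst h; simp
  · rw [if_neg (by simpa using fun h' : x = y => h h'.symm), if_neg h]

-- A's shrink loop: it stops exactly at the first occurrence (at offset d) of newNum at or
-- after `left`, has discarded everything before it, and the sum follows the window.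
lemma pvAShrink_spec (nums : List Int) (x : Int) {m : Nat} (hm : m ≤ nums.length) :
    ∀ (d fuel L : Nat) (s : PySem.Set Int) (cur : Int),
    d < fuel → L + d < m →
    nums[L + d]? = some x →
    (∀ i : Nat, L ≤ i → i < L + d → nums[i]? ≠ some x) →
    (∀ y, y ∈ s ↔ y ∈ pvWin nums L m) →
    (pvWin nums L m).Nodup →
    cur = (pvWin nums L m).sum →
    ∃ s'' : PySem.Set Int,
      pvAShrink nums x fuel L s cur = (L + d, s'', (pvWin nums (L + d) m).sum) ∧
      ∀ y, y ∈ s'' ↔ y ∈ pvWin nums (L + d) m := by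
  intro d
  induction d with
  | zero =>
    intro fuel L s cur hfuel hLd hocc _ hmem _ hsum
    obtain ⟨f, rfl⟩ : ∃ f, fuel = f + 1 := ⟨fuel - 1, by omega⟩
    refine ⟨s, ?_, by simpa using hmem⟩
    unfold pvAShrink
    rw [show PySem.List.pyGet? nums ((L : Nat) : Int) = nums[L]? from PySem.List.pyGet?_natCast nums L]
    simp only [Nat.add_zero] at hocc ⊢
    rw [hocc]
    simp [hsum]
  | succ d ih =>
    intro fuel L s cur hfuel hLd hocc hfree hmem hnd hsum
    obtain ⟨f, rfl⟩ : ∃ f, fuel = f + 1 := ⟨fuel - 1, by omega⟩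
    have hLm : L < m := by omega
    have hLlen : L < nums.length := by omega
    obtain ⟨v, hv⟩ : ∃ v, nums[L]? = some v := ⟨nums[L], List.getElem?_eq_getElem hLlen⟩
    have hne : v ≠ x := by
      intro h; subst h
      exact hfree L le_rfl (by omega) hv
    have hvmem : v ∈ s := by
      rw [hmem]
      rw [pvWin_cons hLm hm hv]; exact List.mem_cons_self
    have hcons := pvWin_cons hLm hm hv
    have hvnotin : v ∉ pvWin nums (L + 1) m := by
      have := hnd; rw [hcons] at this
      exact (List.nodup_cons.mp this).1
    have hmem' : ∀ y, y ∈ PySem.Set.discard s v ↔ y ∈ pvWin nums (L + 1) m := by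
      intro y
      rw [PySem.Set.mem_discard, hmem, hcons]
      constructor
      · rintro ⟨h1, h2⟩
        rcases List.mem_cons.mp h1 with h | h
        · exact absurd h h2
        · exact h
      · intro h
        exact ⟨List.mem_cons_of_mem _ h, fun he => hvnotin (he ▸ h)⟩
    have hnd' : (pvWin nums (L + 1) m).Nodup := by
      have := hnd; rw [hcons] at this; exact (List.nodup_cons.mp this).2
    have hsum' : cur - v = (pvWin nums (L + 1) m).sum := by
      rw [hsum, hcons]; simp
    have := ih f (L + 1) (PySem.Set.discard s v) (cur - v) (by omega)
      (by omega) (by rw [show L + 1 + d = L + (d + 1) by omega]; exact hocc)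
      (fun i h1 h2 => hfree i (by omega) (by omega)) hmem' hnd' hsum'
    obtain ⟨s'', heq, hs''⟩ := this
    refine ⟨s'', ?_, by rw [show L + (d + 1) = L + 1 + d by omega]; exact hs''⟩
    unfold pvAShrink
    rw [show PySem.List.pyGet? nums ((L : Nat) : Int) = nums[L]? from PySem.List.pyGet?_natCast nums L, hv]
    have hrem : PySem.Set.remove? s v = some (PySem.Set.discard s v) := by
      unfold PySem.Set.remove?
      rw [if_pos (PySem.Set.contains_iff s v |>.mpr hvmem)]
    simp only [hne, if_pos, ne_eq, not_false_iff, hrem]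
    rw [show L + (d + 1) = L + 1 + d by omega] at *
    exact heq

-- the prefix list is the table of prefix sums
lemma pvPrefix_eq (nums : List Int) :
    pvPrefix nums = (List.range (nums.length + 1)).map (fun i => (nums.take i).sum) := by
  induction nums using List.reverseRecOn with
  | nil => simp [pvPrefix]
  | append_singleton xs x ih =>
    unfold pvPrefix at ih ⊢
    rw [List.foldl_append, ih]
    simp only [List.foldl_cons, List.foldl_nil]
    have hlast : PySem.List.pyGet? ((List.range (xs.length + 1)).map (fun i => (xs.take i).sum)) (-1)
        = some ((xs.take xs.length).sum) := by
      simp [PySem.List.pyGet?, PySem.List.pyIdx?]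
    rw [hlast]
    rw [show xs.length + 1 = (xs ++ [x]).length from by simp]
    rw [List.range_succ, List.map_append]
    congr 1
    · apply List.map_congr_left
      intro i hi
      rw [List.mem_range] at hi
      rw [List.take_append_of_le_length (by simp at hi ⊢; omega)]
    · simp [List.take_length]

lemma pvPrefix_get (nums : List Int) {i : Nat} (hi : i ≤ nums.length) :
    (PySem.List.pyGet? (pvPrefix nums) (i : Int)).getD 0 = (nums.take i).sum := by
  rw [PySem.List.pyGet?_natCast, pvPrefix_eq]
  rw [List.getElem?_map, List.getElem?_range (by omega)]
  simp

-- sum of the window from the prefix table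
lemma pvWin_sum (nums : List Int) {L m : Nat} (hL : L ≤ m) (_hm : m ≤ nums.length) :
    (pvWin nums L m).sum = (nums.take m).sum - (nums.take L).sum := by
  unfold pvWin
  have h1 := congrArg List.sum (List.take_append_drop L (nums.take m))
  rw [List.sum_append, List.take_take, min_eq_left hL] at h1
  omega

lemma pvWin_length (nums : List Int) (L m : Nat) (hm : m ≤ nums.length) :
    (pvWin nums L m).length = m - L := by
  unfold pvWin; simp; omega

lemma pvWin_uniq {nums : List Int} {L m : Nat} (hm : m ≤ nums.length)
    (hnd : (pvWin nums L m).Nodup) {x : Int} {i i' : Nat}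
    (h1 : L ≤ i) (h2 : i < m) (h3 : L ≤ i') (h4 : i' < m)
    (h5 : nums[i]? = some x) (h6 : nums[i']? = some x) : i = i' := by
  have key : ∀ j : Nat, L ≤ j → j < m → (pvWin nums L m)[j - L]? = nums[j]? := by
    intro j hj1 hj2
    unfold pvWin
    rw [List.getElem?_drop, List.getElem?_take, show L + (j - L) = j by omega, if_pos hj2]
  have hlen : i - L < (pvWin nums L m).length := by rw [pvWin_length nums L m hm]; omega
  have := List.getElem?_inj (xs := pvWin nums L m) (i := i - L) (j := i' - L) hlen hnd
    (by rw [key i h1 h2, key i' h3 h4, h5, h6])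
  omega

-- THE MAIN LOOP INVARIANT: from any aligned pair of states, the two loops end with equal bests
lemma pvLoopEq (nums : List Int) :
    ∀ (k m L : Nat) (s : PySem.Set Int) (bestv : Int) (last : PySem.Dict Int Int),
    nums.length = m + k → L < m →
    (pvWin nums L m).Nodup →
    (∀ y, y ∈ s ↔ y ∈ pvWin nums L m) →
    (∀ x, last.get? x = pvLast nums m x) →
    ((PySem.List.pyRange (m : Int) (nums.length : Int)).foldl (pvStepA nums)
        (L, s, (pvWin nums L m).sum, bestv)).2.2.2
      = ((PySem.List.enumerate (nums.drop m) (m : Int)).foldl (pvStepB (pvPrefix nums))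
          (bestv, last, (L : Int))).1 := by
  intro k
  induction k with
  | zero =>
    intro m L s bestv last hlen hL hnd hmem hlast
    have hm : m = nums.length := by omega
    subst hm
    rw [List.drop_length]
    have h0 : PySem.List.pyRange (nums.length : Int) (nums.length : Int) = [] := by
      simp [PySem.List.pyRange]
    rw [h0]
    rfl
  | succ k ih =>
    intro m L s bestv last hlen hL hnd hmem hlast
    have hmn : m < nums.length := by omega
    have hm' : m ≤ nums.length := le_of_lt hmn
    have hm1 : m + 1 ≤ nums.length := hmn
    obtain ⟨x, hx⟩ : ∃ x, nums[m]? = some x := ⟨nums[m], List.getElem?_eq_getElem hmn⟩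
    have hgetm : PySem.List.pyGet? nums (m : Int) = some x := by
      rw [PySem.List.pyGet?_natCast]; exact hx
    rw [PySem.List.pyRange_one_cons (by exact_mod_cast hmn),
        List.drop_eq_getElem_cons hmn,
        show PySem.List.enumerate (nums[m] :: nums.drop (m + 1)) (m : Int)
          = ((m : Int), nums[m]) :: PySem.List.enumerate (nums.drop (m + 1)) ((m : Int) + 1) from rfl]
    have hxval : nums[m] = x := by simpa [List.getElem?_eq_getElem hmn] using hx
    rw [hxval]
    simp only [List.foldl_cons]
    -- the dict after this step satisfies the invariant at m+1 in both cases
    have hlast' : ∀ y, (last.insert x (m : Int)).get? y = pvLast nums (m + 1) y := by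
      intro y
      rw [PySem.Dict.get?_insert, hlast y, pvLast_succ nums m x y hx]
    by_cases hxin : x ∈ pvWin nums L m
    · -- duplicate inside the window: A shrinks, B jumps
      have hcont : PySem.Set.contains s x = true :=
        (PySem.Set.contains_iff s x).mpr ((hmem x).mpr hxin)
      obtain ⟨i0, hi0L, hi0m, hi0v⟩ := (pvWin_mem hm' x).mp hxin
      cases hc : pvLast nums m x with
      | none => exact absurd hi0v (pvLast_none hc i0 hi0m)
      | some j =>
        obtain ⟨jn, rfl, hjm, hjv, hjmax⟩ := pvLast_spec hc
        have hLj : L ≤ jn := by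
          rcases Nat.lt_or_ge jn i0 with hh | hh
          · exact absurd hi0v (hjmax i0 hh hi0m)
          · omega
        have hfree : ∀ i : Nat, L ≤ i → i < jn → nums[i]? ≠ some x := by
          intro i hiL hij hiv
          have := pvWin_uniq hm' hnd hiL (by omega) hLj hjm hiv hjv
          omega
        obtain ⟨s'', hshrink, hs''⟩ := pvAShrink_spec nums x hm' (jn - L) nums.length L s
          ((pvWin nums L m).sum) (by omega) (by omega)
          (by rw [show L + (jn - L) = jn by omega]; exact hjv)
          (fun i h1 h2 => hfree i h1 (by omega)) hmem hnd rfl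
        rw [show L + (jn - L) = jn by omega] at hshrink hs''
        have hstepA : pvStepA nums (L, s, (pvWin nums L m).sum, bestv) (m : Int)
            = (jn + 1, s'', (pvWin nums jn m).sum, bestv) := by
          simp only [pvStepA]
          rw [hgetm]
          simp only [hcont, if_true]
          rw [hshrink]
        have hstepB : pvStepB (pvPrefix nums) (bestv, last, (L : Int)) ((m : Int), x)
            = (bestv, last.insert x (m : Int), (jn : Int) + 1) := by
          simp only [pvStepB]
          rw [hlast x, hc]
          simp only [ge_iff_le]
          rw [if_pos (by exact_mod_cast hLj : ((L : Int) ≤ (jn : Int)))]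
        rw [hstepA, hstepB]
        -- window bookkeeping for the new state (left = jn+1, processed = m+1)
        have hconsj := pvWin_cons hjm hm' hjv
        have hsucc : pvWin nums (jn + 1) (m + 1) = pvWin nums (jn + 1) m ++ [x] :=
          pvWin_succ (by omega) hmn hx
        have hndj : (pvWin nums (jn + 1) m).Nodup := by
          have hdrop : pvWin nums (jn + 1) m = (pvWin nums L m).drop (jn + 1 - L) := by
            unfold pvWin
            rw [List.drop_drop]
            congr 1
            omega
          rw [hdrop]
          exact hnd.sublist (List.drop_sublist _ _)
        have hxnot : x ∉ pvWin nums (jn + 1) m := by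
          intro hmem2
          obtain ⟨i, h1, h2, h3⟩ := (pvWin_mem hm' x).mp hmem2
          exact hjmax i (by omega) h2 h3
        have hnd' : (pvWin nums (jn + 1) (m + 1)).Nodup := by
          rw [hsucc, List.nodup_append_comm]
          exact List.nodup_cons.mpr ⟨hxnot, hndj⟩
        have hmem' : ∀ y, y ∈ s'' ↔ y ∈ pvWin nums (jn + 1) (m + 1) := by
          intro y
          rw [hs'' y, hconsj, hsucc]
          simp [or_comm]
        have hsum' : (pvWin nums jn m).sum = (pvWin nums (jn + 1) (m + 1)).sum := by
          rw [hconsj, hsucc]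
          simp [add_comm]
        rw [hsum']
        have := ih (m + 1) (jn + 1) s'' bestv (last.insert x (m : Int))
          (by omega) (by omega) hnd' hmem' hlast'
        rw [show ((m : Nat) + 1 : Nat) = ((m + 1 : Nat)) from rfl] at this
        push_cast at this ⊢
        exact this
    · -- fresh element: A extends the window, B takes the no-jump branch
      have hcont : PySem.Set.contains s x = false := by
        rw [← Bool.not_eq_true]
        intro h
        exact hxin ((hmem x).mp ((PySem.Set.contains_iff s x).mp h))
      have hwin1 : pvWin nums L (m + 1) = pvWin nums L m ++ [x] :=
        pvWin_succ (by omega) hmn hx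
      have hnd' : (pvWin nums L (m + 1)).Nodup := by
        rw [hwin1, List.nodup_append_comm]
        exact List.nodup_cons.mpr ⟨hxin, hnd⟩
      have hcurA : (pvWin nums L m).sum + x = (pvWin nums L (m + 1)).sum := by
        rw [hwin1]; simp
      have hstepA : pvStepA nums (L, s, (pvWin nums L m).sum, bestv) (m : Int)
          = (L, PySem.Set.add s x, (pvWin nums L (m + 1)).sum,
             if (pvWin nums L (m + 1)).sum > bestv then (pvWin nums L (m + 1)).sum else bestv) := by
        simp only [pvStepA]
        rw [hgetm]
        simp only [hcont, if_false, Bool.false_eq_true]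
        rw [hcurA]
      -- B's window sum from the prefix table
      have hcurB : (PySem.List.pyGet? (pvPrefix nums) ((m : Int) + 1)).getD 0
            - (PySem.List.pyGet? (pvPrefix nums) (L : Int)).getD 0
          = (pvWin nums L (m + 1)).sum := by
        rw [show ((m : Int) + 1) = ((m + 1 : Nat) : Int) by push_cast; ring]
        rw [pvPrefix_get nums hm1, pvPrefix_get nums (by omega)]
        rw [pvWin_sum nums (by omega) hm1]
      have hnoJump : pvStepB (pvPrefix nums) (bestv, last, (L : Int)) ((m : Int), x)
          = (if (pvWin nums L (m + 1)).sum > bestv then (pvWin nums L (m + 1)).sum else bestv,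
             last.insert x (m : Int), (L : Int)) := by
        simp only [pvStepB]
        cases hc : pvLast nums m x with
        | none =>
          rw [hlast x, hc]
          simp only [hcurB]
        | some j =>
          obtain ⟨jn, rfl, hjm, hjv, hjmax⟩ := pvLast_spec hc
          have hjL : jn < L := by
            by_contra hh
            push_neg at hh
            exact hxin ((pvWin_mem hm' x).mpr ⟨jn, hh, hjm, hjv⟩)
          rw [hlast x, hc]
          simp only [ge_iff_le]
          rw [if_neg (by exact_mod_cast Nat.not_le.mpr hjL)]
          simp only [hcurB]
      rw [hstepA, hnoJump]
      have hmem' : ∀ y, y ∈ PySem.Set.add s x ↔ y ∈ pvWin nums L (m + 1) := by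
        intro y
        rw [PySem.Set.mem_add, hmem y, hwin1]
        simp
      have := ih (m + 1) L (PySem.Set.add s x)
        (if (pvWin nums L (m + 1)).sum > bestv then (pvWin nums L (m + 1)).sum else bestv)
        (last.insert x (m : Int)) (by omega) (by omega) hnd' hmem' hlast'
      push_cast at this ⊢
      exact this

-- ===== VERDICT (by name: the statement is the Claim_ definition above) =====
theorem maximumErasureValue_spec : Claim_equal_maximumErasureValue := by
  intro nums _ hpre
  unfold Spec_maximumErasureValue
  obtain ⟨y, t, rfl⟩ : ∃ y t, nums = y :: t := by
    cases nums with
    | nil => exact absurd rfl hpre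
    | cons y t => exact ⟨y, t, rfl⟩
  have hget0 : PySem.List.pyGet? (y :: t) (0 : Int) = some y := by
    rw [show (0 : Int) = ((0 : Nat) : Int) from rfl, PySem.List.pyGet?_natCast]
    rfl
  unfold maximumErasureValue maximumErasureValue_alt
  rw [hget0]
  -- B's m = 0 step, done by hand: it establishes the invariant at m = 1
  have henum : PySem.List.enumerate (y :: t) 0 = ((0 : Int), y) :: PySem.List.enumerate t 1 := rfl
  rw [henum]
  simp only [List.foldl_cons]
  have hp1 : (PySem.List.pyGet? (pvPrefix (y :: t)) ((0 : Int) + 1)).getD 0 = y := by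
    have := pvPrefix_get (y :: t) (i := 1) (by simp)
    rw [show ((0 : Int) + 1) = ((1 : Nat) : Int) by norm_num]
    rw [this]
    simp
  have hp0 : (PySem.List.pyGet? (pvPrefix (y :: t)) (0 : Int)).getD 0 = 0 := by
    simpa using pvPrefix_get (y :: t) (i := 0) (by simp)
  have hstep0 : pvStepB (pvPrefix (y :: t)) (y, PySem.Dict.empty, 0) ((0 : Int), y)
      = (y, PySem.Dict.empty.insert y 0, 0) := by
    simp only [pvStepB, PySem.Dict.get?_empty, hp1, hp0]
    norm_num
  rw [hstep0]
  have hlast1 : ∀ z, (PySem.Dict.empty.insert y (0 : Int)).get? z = pvLast (y :: t) 1 z := by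
    intro z
    rw [PySem.Dict.get?_insert, PySem.Dict.get?_empty]
    have h1 : pvLast (y :: t) 1 z = if (y :: t)[0]? = some z then some (0 : Int) else none := by
      conv_lhs => rw [pvLast]
      simp [pvLast]
    rw [h1]
    simp only [List.getElem?_cons_zero, Option.some_inj]
    by_cases h : z = y
    · subst h; simp
    · rw [if_neg h, if_neg (fun hh => h hh.symm)]
  have main := pvLoopEq (y :: t) t.length 1 0 (PySem.Set.ofList [y]) y
    (PySem.Dict.empty.insert y 0) (by simp; omega) (by omega)
    (by simp [pvWin])
    (by intro z; rw [PySem.Set.mem_ofList]; simp [pvWin])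
    hlast1
  have hwin01 : pvWin (y :: t) 0 1 = [y] := rfl
  rw [hwin01] at main
  simp only [List.sum_cons, List.sum_nil, add_zero, List.drop_succ_cons, List.drop_zero] at main
  norm_num at main ⊢
  exact main
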